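-- pv_equiv track=rewrite | github.com/zhouzihanntu/Leetcode | LCP 08. 剧情触发时间/getTriggerTime.py | getTriggerTime
-- ===== SOURCE A (Python) =====
-- def getTriggerTime(increase, requirements):
--     a = [0 for i in range(3)]
--     requirements = [x + [i] for i, x in enumerate(requirements)]
--     s = [sorted(requirements, key=lambda x: x[i]) for i in range(3)]
--     index = [0 for i in range(3)]
--     n = len(requirements)
--     trigger = [0 for i in range(n)]
--     ans = [-1 for i in range(n)]
--     for d, (na,nb,nc) in enumerate(increase):
--         a[0] += na; a[1] += nb; a[2] += nc
--         for i in range(3):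
--             while index[i] < n and a[i] >= s[i][index[i]][i]:
--                 trigger[s[i][index[i]][-1]] += 1
--                 if trigger[s[i][index[i]][-1]] == 3:
--                     ans[s[i][index[i]][-1]] = d + 1
--                 index[i] += 1
--     for i, (na, nb, nc, _) in enumerate(requirements):
--         if na == 0 and nb == 0 and nc == 0:
--             ans[_] = 0
--     return ans
-- ===== SOURCE B (Python) =====
-- def getTriggerTime(increase, requirements):
--     # prefix sums per attribute; p[k] = total after k days (p[0] = 0)
--     p0, p1, p2 = [0], [0], [0]
--     for x, y, z in increase:
--         p0.append(p0[-1] + x)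
--         p1.append(p1[-1] + y)
--         p2.append(p2[-1] + z)
--
--     def first_day(p, t):
--         # smallest day k >= 1 whose cumulative value reaches t, else None
--         for k in range(1, len(p)):
--             if p[k] >= t:
--                 return k
--         return None
--
--     def solve(req):
--         a, b, c = req
--         if a == 0 and b == 0 and c == 0:
--             return 0
--         ds = (first_day(p0, a), first_day(p1, b), first_day(p2, c))
--         return -1 if None in ds else max(ds)
--
--     return [solve(req) for req in requirements]
-- ===== Notes on version B (the rewrite author's own statement) =====
-- stated objective: simpler
-- what changed: B drops A's three stable sorts, moving pointers and per-requirement trigger counters, and instead builds three prefix-sum lists once and answers each requirement independently by scanning each prefix list for the first day its threshold is reached (answer = max of the three first days, -1 if any is missing, 0 for an all-zero requirement).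
import Mathlib
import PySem

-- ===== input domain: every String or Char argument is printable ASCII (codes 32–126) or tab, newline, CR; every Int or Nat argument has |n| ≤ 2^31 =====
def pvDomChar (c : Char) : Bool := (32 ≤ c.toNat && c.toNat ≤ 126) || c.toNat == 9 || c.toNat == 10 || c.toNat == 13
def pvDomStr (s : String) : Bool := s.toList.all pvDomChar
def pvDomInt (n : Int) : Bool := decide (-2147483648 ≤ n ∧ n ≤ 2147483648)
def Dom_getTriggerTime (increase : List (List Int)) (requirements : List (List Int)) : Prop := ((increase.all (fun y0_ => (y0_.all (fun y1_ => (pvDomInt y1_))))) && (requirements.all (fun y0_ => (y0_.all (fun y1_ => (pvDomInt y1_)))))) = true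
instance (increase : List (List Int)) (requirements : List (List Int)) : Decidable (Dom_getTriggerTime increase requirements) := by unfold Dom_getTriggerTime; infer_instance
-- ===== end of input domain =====

-- B replaces A's sorted three-pointer day sweep by per-requirement scans over prefix-sum lists (simpler decomposition, same results).

-- ===== PORT A =====
-- A's 'x + [i]' (the original index appended so it survives the sort) is modelled as the pair (x, i):
-- the sort key x[i] becomes keyAt i and the retrieval x[-1] becomes .2 — same keys, same stable order.
def keyAt (i : Nat) (e : List Int × Nat) : Int := e.1.getD i 0   -- x[i]; rows have length 3 under Pre_

-- the inner 'while index[i] < n and a[i] >= s[i][index[i]][i]' loop; the pointer into s[i] is the remaining suffix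
def runCoord (i : Nat) (ai : Int) (d : Nat) :
    List (List Int × Nat) → List Int → List Int → (List (List Int × Nat) × List Int × List Int)
  | [], trig, ans => ([], trig, ans)
  | e :: rest, trig, ans =>
    if keyAt i e ≤ ai then
      let trig' := trig.set e.2 (trig.getD e.2 0 + 1)
      let ans' := if trig'.getD e.2 0 = 3 then ans.set e.2 ((d : Int) + 1) else ans
      runCoord i ai d rest trig' ans'
    else (e :: rest, trig, ans)

structure PVAState where
  a0 : Int
  a1 : Int
  a2 : Int
  s0 : List (List Int × Nat)
  s1 : List (List Int × Nat)
  s2 : List (List Int × Nat)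
  trig : List Int
  ans : List Int

-- one iteration of 'for d, (na, nb, nc) in enumerate(increase)'
def aStep (st : PVAState) (de : List Int × Nat) : PVAState :=
  match de.1 with
  | [na, nb, nc] =>
    let a0 := st.a0 + na
    let a1 := st.a1 + nb
    let a2 := st.a2 + nc
    let r0 := runCoord 0 a0 de.2 st.s0 st.trig st.ans
    let r1 := runCoord 1 a1 de.2 st.s1 r0.2.1 r0.2.2
    let r2 := runCoord 2 a2 de.2 st.s2 r1.2.1 r1.2.2
    ⟨a0, a1, a2, r0.1, r1.1, r2.1, r2.2.1, r2.2.2⟩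
  | _ => st   -- Python raises ValueError here (row not of length 3); unreachable under Pre_

def getTriggerTime (increase : List (List Int)) (requirements : List (List Int)) : List Int :=
  let reqs := requirements.zipIdx
  let s0 := PySem.List.sorted reqs (keyAt 0) false
  let s1 := PySem.List.sorted reqs (keyAt 1) false
  let s2 := PySem.List.sorted reqs (keyAt 2) false
  let nn := reqs.length
  let st0 : PVAState := ⟨0, 0, 0, s0, s1, s2, List.replicate nn 0, List.replicate nn (-1)⟩
  let fin := increase.zipIdx.foldl aStep st0
  reqs.foldl (fun ans e =>
    match e.1 with
    | [na, nb, nc] => if na = 0 ∧ nb = 0 ∧ nc = 0 then ans.set e.2 0 else ans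
    | _ => ans) fin.ans   -- '_' branch: Python raises ValueError; unreachable under Pre_

-- ===== PORT B =====
-- one iteration of 'for x, y, z in increase' appending to the three prefix lists
def prefStep (p : List Int × List Int × List Int) (row : List Int) : List Int × List Int × List Int :=
  match row with
  | [x, y, z] =>
    (p.1 ++ [PySem.List.pyGetD p.1 (-1) 0 + x],
     p.2.1 ++ [PySem.List.pyGetD p.2.1 (-1) 0 + y],
     p.2.2 ++ [PySem.List.pyGetD p.2.2 (-1) 0 + z])
  | _ => p   -- Python raises ValueError here; unreachable under Pre_

-- 'for k in range(1, len(p)): if p[k] >= t: return k' — scans p[1:], k counting from 1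
def fdGo (t : Int) (k : Int) : List Int → Option Int
  | [] => none
  | v :: rest => if t ≤ v then some k else fdGo t (k + 1) rest

def firstDay (p : List Int) (t : Int) : Option Int := fdGo t 1 p.tail

def solveReq (p0 p1 p2 : List Int) (row : List Int) : Int :=
  match row with
  | [a, b, c] =>
    if a = 0 ∧ b = 0 ∧ c = 0 then 0
    else
      match firstDay p0 a, firstDay p1 b, firstDay p2 c with
      | some d0, some d1, some d2 => max d0 (max d1 d2)
      | _, _, _ => -1
  | _ => 0   -- Python raises ValueError here; unreachable under Pre_

def getTriggerTime_alt (increase : List (List Int)) (requirements : List (List Int)) : List Int :=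
  let p := increase.foldl prefStep ([0], [0], [0])
  requirements.map (solveReq p.1 p.2.1 p.2.2)

-- ===== PRECONDITION & SPEC =====
-- Pre_ = exactly A's return domain: every row of both lists has length 3 (otherwise the Python
-- raises ValueError/IndexError on tuple unpacking or on the sort key x[i]).
def Pre_getTriggerTime (increase : List (List Int)) (requirements : List (List Int)) : Prop :=
  (∀ row ∈ increase, row.length = 3) ∧ (∀ row ∈ requirements, row.length = 3)
instance (increase : List (List Int)) (requirements : List (List Int)) : Decidable (Pre_getTriggerTime increase requirements) := by unfold Pre_getTriggerTime; infer_instance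

def pvWitness_getTriggerTime : List (List Int) × List (List Int) :=
  ([[2, 8, 4], [2, 1, 1], [-1, 5, 0]], [[2, 11, 3], [0, 0, 0], [15, 1, 1], [1, 1, 1]])

def Spec_getTriggerTime (increase : List (List Int)) (requirements : List (List Int)) (out : List Int) : Prop := out = getTriggerTime_alt increase requirements
instance (increase : List (List Int)) (requirements : List (List Int)) (out : List Int) : Decidable (Spec_getTriggerTime increase requirements out) := by unfold Spec_getTriggerTime; infer_instance

-- ===== CLAIM (what is proved, stated in full; the proofs are below) =====
def Claim_equal_getTriggerTime : Prop := ∀ (increase : List (List Int)) (requirements : List (List Int)), Dom_getTriggerTime increase requirements → Pre_getTriggerTime increase requirements → Spec_getTriggerTime increase requirements (getTriggerTime increase requirements)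


-- ===== LEMMAS AND PROOFS =====

-- ---- specification vocabulary (proof helpers only) ----

/-- Sum of column `j` over the first `d` rows of `increase` (the hero's attribute after `d` days). -/
def colS (increase : List (List Int)) (j : Nat) (d : Nat) : Int :=
  ((increase.take d).map (fun row => row.getD j 0)).sum

/-- Threshold `t` on coordinate `j` has been reached by some day `1 .. d`. -/
abbrev CrossP (increase : List (List Int)) (j : Nat) (t : Int) (d : Nat) : Prop :=
  ∃ k < d, t ≤ colS increase j (k + 1)

def kval (requirements : List (List Int)) (j r : Nat) : Int :=
  (requirements.getD r []).getD j 0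

abbrev allCrossP (increase requirements : List (List Int)) (r d : Nat) : Prop :=
  ∀ j < 3, CrossP increase j (kval requirements j r) d

/-- The value A's `ans[r]` holds after `d` days. -/
def ansSpecAt (increase requirements : List (List Int)) (r d : Nat) : Int :=
  if h : allCrossP increase requirements r d then
    ((Nat.find (⟨d, h⟩ : ∃ d', allCrossP increase requirements r d')) : Int)
  else -1

/-- The value A's `trigger[r]` holds after `d` days. -/
def cnt3 (increase requirements : List (List Int)) (r d : Nat) : Int :=
  (if CrossP increase 0 (kval requirements 0 r) d then 1 else 0)
  + (if CrossP increase 1 (kval requirements 1 r) d then 1 else 0)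
  + (if CrossP increase 2 (kval requirements 2 r) d then 1 else 0)

def sortedE (requirements : List (List Int)) (j : Nat) : List (List Int × Nat) :=
  PySem.List.sorted requirements.zipIdx (keyAt j) false

/-- What A's pointer suffix `s[j][index[j]:]` is after `d` days. -/
def remj (increase requirements : List (List Int)) (j d : Nat) : List (List Int × Nat) :=
  (sortedE requirements j).dropWhile (fun e => decide (CrossP increase j (keyAt j e) d))

def trigSpec (increase requirements : List (List Int)) (d : Nat) : List Int :=
  (List.range requirements.length).map (fun r => cnt3 increase requirements r d)

def ansSpec (increase requirements : List (List Int)) (d : Nat) : List Int :=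
  (List.range requirements.length).map (fun r => ansSpecAt increase requirements r d)

def AInv (increase requirements : List (List Int)) (d : Nat) (st : PVAState) : Prop :=
  st.a0 = colS increase 0 d ∧ st.a1 = colS increase 1 d ∧ st.a2 = colS increase 2 d ∧
  st.s0 = remj increase requirements 0 d ∧ st.s1 = remj increase requirements 1 d ∧
  st.s2 = remj increase requirements 2 d ∧
  st.trig = trigSpec increase requirements d ∧ st.ans = ansSpec increase requirements d

/-- The body of A's while loop acting on the pair (trigger, ans). -/
def updTA (d : Nat) (ta : List Int × List Int) (e : List Int × Nat) : List Int × List Int :=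
  let trig' := ta.1.set e.2 (ta.1.getD e.2 0 + 1)
  (trig', if trig'.getD e.2 0 = 3 then ta.2.set e.2 ((d : Int) + 1) else ta.2)

-- ---- generic list lemmas ----

theorem dropWhile_congr_mem {α : Type} (p q : α → Bool) :
    ∀ (l : List α), (∀ e ∈ l, p e = q e) → l.dropWhile p = l.dropWhile q := by
  intro l
  induction l with
  | nil => intro _; rfl
  | cons a l ih =>
    intro h
    simp only [List.dropWhile_cons, h a (List.mem_cons_self)]
    split
    · exact ih (fun e he => h e (List.mem_cons_of_mem _ he))
    · rfl

theorem dropWhile_all_false {α : Type} (key : α → Int) (p : α → Bool)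
    (hmono : ∀ a b, key a ≤ key b → p b = true → p a = true) :
    ∀ (l : List α), l.Pairwise (fun a b => key a ≤ key b) →
      ∀ e ∈ l.dropWhile p, p e = false := by
  intro l
  induction l with
  | nil => simp
  | cons a l ih =>
    intro hp e he
    rcases List.pairwise_cons.mp hp with ⟨hrel, hl⟩
    by_cases hpa : p a = true
    · rw [List.dropWhile_cons_of_pos hpa] at he
      exact ih hl e he
    · rw [List.dropWhile_cons_of_neg hpa] at he
      rcases List.mem_cons.mp he with rfl | he'
      · exact Bool.eq_false_iff.mpr hpa
      · by_cases hpe : p e = true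
        · exact absurd (hmono a e (hrel e he') hpe) hpa
        · exact Bool.eq_false_iff.mpr hpe

theorem dropWhile_eq_filter_not {α : Type} (key : α → Int) (p : α → Bool)
    (hmono : ∀ a b, key a ≤ key b → p b = true → p a = true) :
    ∀ (l : List α), l.Pairwise (fun a b => key a ≤ key b) →
      l.dropWhile p = l.filter (fun e => ! p e) := by
  intro l
  induction l with
  | nil => intro _; rfl
  | cons a l ih =>
    intro hp
    rcases List.pairwise_cons.mp hp with ⟨hrel, hl⟩
    by_cases hpa : p a = true
    · rw [List.dropWhile_cons_of_pos hpa, List.filter_cons_of_neg (by simp [hpa]), ih hl]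
    · rw [List.dropWhile_cons_of_neg hpa, List.filter_cons_of_pos (by simp [Bool.eq_false_iff.mpr hpa])]
      congr 1
      rw [List.filter_eq_self.mpr]
      intro e he
      have : p e = false := by
        by_cases hpe : p e = true
        · exact absurd (hmono a e (hrel e he) hpe) hpa
        · exact Bool.eq_false_iff.mpr hpe
      simp [this]

theorem takeWhile_eq_filter {α : Type} (key : α → Int) (p : α → Bool)
    (hmono : ∀ a b, key a ≤ key b → p b = true → p a = true) :
    ∀ (l : List α), l.Pairwise (fun a b => key a ≤ key b) →
      l.takeWhile p = l.filter p := by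
  intro l
  induction l with
  | nil => intro _; rfl
  | cons a l ih =>
    intro hp
    rcases List.pairwise_cons.mp hp with ⟨hrel, hl⟩
    by_cases hpa : p a = true
    · rw [List.takeWhile_cons_of_pos hpa, List.filter_cons_of_pos hpa, ih hl]
    · rw [List.takeWhile_cons_of_neg hpa, List.filter_cons_of_neg hpa,
        List.filter_eq_nil_iff.mpr]
      intro e he
      by_cases hpe : p e = true
      · exact absurd (hmono a e (hrel e he) hpe) hpa
      · simpa using Bool.eq_false_iff.mpr hpe

theorem dropWhile_dropWhile {α : Type} (p q : α → Bool) (himp : ∀ e, p e = true → q e = true) :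
    ∀ (l : List α), (l.dropWhile p).dropWhile q = l.dropWhile q := by
  intro l
  induction l with
  | nil => rfl
  | cons a l ih =>
    by_cases hpa : p a = true
    · rw [List.dropWhile_cons_of_pos hpa, List.dropWhile_cons_of_pos (himp a hpa), ih]
    · rw [List.dropWhile_cons_of_neg hpa]

-- ---- runCoord and the update fold ----

theorem runCoord_eq (i : Nat) (a : Int) (d : Nat) :
    ∀ (l : List (List Int × Nat)) (trig ans : List Int),
      runCoord i a d l trig ans =
        (l.dropWhile (fun e => decide (keyAt i e ≤ a)),
         (l.takeWhile (fun e => decide (keyAt i e ≤ a))).foldl (updTA d) (trig, ans)) := by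
  intro l
  induction l with
  | nil => intro trig ans; rfl
  | cons e rest ih =>
    intro trig ans
    by_cases h : keyAt i e ≤ a
    · rw [List.dropWhile_cons_of_pos (by simpa using h), List.takeWhile_cons_of_pos (by simpa using h)]
      simp only [runCoord, if_pos h, List.foldl_cons]
      exact ih _ _
    · rw [List.dropWhile_cons_of_neg (by simpa using h), List.takeWhile_cons_of_neg (by simpa using h)]
      simp only [runCoord, if_neg h, List.foldl_nil]

theorem foldUpd_len (d : Nat) :
    ∀ (P : List (List Int × Nat)) (ta : List Int × List Int),
      (P.foldl (updTA d) ta).1.length = ta.1.length ∧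
      (P.foldl (updTA d) ta).2.length = ta.2.length := by
  intro P
  induction P with
  | nil => intro ta; exact ⟨rfl, rfl⟩
  | cons e rest ih =>
    intro ta
    rw [List.foldl_cons]
    rcases ih (updTA d ta e) with ⟨h1, h2⟩
    constructor
    · rw [h1]; simp [updTA]
    · rw [h2]; simp only [updTA]; split <;> simp

theorem foldUpd_getD (d : Nat) :
    ∀ (P : List (List Int × Nat)) (trig ans : List Int) (r : Nat),
      r < trig.length → r < ans.length →
      ((P.foldl (updTA d) (trig, ans)).1.getD r 0
          = trig.getD r 0 + ((P.countP (fun e => e.2 == r) : Nat) : Int)) ∧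
      ((P.foldl (updTA d) (trig, ans)).2.getD r 0
          = if trig.getD r 0 < 3 ∧ 3 ≤ trig.getD r 0 + ((P.countP (fun e => e.2 == r) : Nat) : Int)
            then ((d : Int) + 1) else ans.getD r 0) := by
  intro P
  induction P with
  | nil =>
    intro trig ans r _ _
    refine ⟨by simp, ?_⟩
    rw [if_neg]
    · rfl
    · rintro ⟨h1, h2⟩
      simp only [List.countP_nil, Nat.cast_zero, add_zero] at h2
      omega
  | cons e rest ih =>
    intro trig ans r hr hra
    rw [List.foldl_cons, List.countP_cons]
    set trig' := trig.set e.2 (trig.getD e.2 0 + 1) with htrig'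
    have hlen' : trig'.length = trig.length := by simp [htrig']
    have hup : updTA d (trig, ans) e
        = (trig', if trig'.getD e.2 0 = 3 then ans.set e.2 ((d : Int) + 1) else ans) := rfl
    by_cases her : e.2 = r
    · -- this entry updates position r
      subst her
      have hget' : trig'.getD e.2 0 = trig.getD e.2 0 + 1 := by
        rw [htrig', List.getD_eq_getElem?_getD, List.getElem?_set, if_pos rfl, if_pos hr]
        rfl
      by_cases h3 : trig.getD e.2 0 + 1 = 3
      · -- trigger hits 3 here: ans set to d+1
        rw [hup, if_pos (by rw [hget']; exact h3)]
        have hans' : (ans.set e.2 ((d : Int) + 1)).getD e.2 0 = (d : Int) + 1 := by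
          rw [List.getD_eq_getElem?_getD, List.getElem?_set, if_pos rfl, if_pos hra]; rfl
        rcases ih trig' (ans.set e.2 ((d : Int) + 1)) e.2 (by omega) (by simp; omega) with ⟨ht, ha⟩
        constructor
        · rw [ht, hget']; simp; ring
        · rw [ha, hget', hans', ite_self, if_pos]
          refine ⟨by omega, ?_⟩
          simp only [beq_self_eq_true, if_true]
          push_cast
          omega
      · rw [hup, if_neg (by rw [hget']; exact h3)]
        rcases ih trig' ans e.2 (by omega) hra with ⟨ht, ha⟩
        constructor
        · rw [ht, hget']; simp; ring
        · rw [ha, hget']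
          simp only [beq_self_eq_true, if_pos]
          by_cases hcond : trig.getD e.2 0 + 1 < 3 ∧ 3 ≤ trig.getD e.2 0 + 1 + ((rest.countP (fun e' => e'.2 == e.2) : Nat) : Int)
          · rw [if_pos hcond, if_pos (by push_cast; omega)]
          · rw [if_neg hcond, if_neg (by push_cast at hcond ⊢; omega)]
    · -- entry for another position: getD at r unchanged
      have hget' : trig'.getD r 0 = trig.getD r 0 := by
        rw [htrig', List.getD_eq_getElem?_getD, List.getElem?_set, if_neg her]; rfl
      have hbeq : (e.2 == r) = false := by simpa using her
      rw [hup]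
      split
      · rcases ih trig' (ans.set e.2 ((d:Int)+1)) r (by omega) (by simpa using hra) with ⟨ht, ha⟩
        have hans' : (ans.set e.2 ((d : Int) + 1)).getD r 0 = ans.getD r 0 := by
          rw [List.getD_eq_getElem?_getD, List.getElem?_set, if_neg her]; rfl
        rw [hbeq]
        refine ⟨by rw [ht, hget']; simp, ?_⟩
        rw [ha, hget', hans']; simp
      · rcases ih trig' ans r (by omega) hra with ⟨ht, ha⟩
        rw [hbeq]
        refine ⟨by rw [ht, hget']; simp, ?_⟩
        rw [ha, hget']; simp

theorem countP_zipIdx {α : Type} [Inhabited α] (r : Nat) (Q : α × Nat → Bool) :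
    ∀ (l : List α) (s : Nat),
      (l.zipIdx s).countP (fun e => e.2 == r && Q e)
        = if s ≤ r ∧ r - s < l.length then (if Q (l.getD (r - s) default, r) then 1 else 0) else 0 := by
  intro l
  induction l with
  | nil => intro s; simp
  | cons x xs ih =>
    intro s
    rw [List.zipIdx_cons, List.countP_cons, ih (s + 1)]
    by_cases hsr : s = r
    · subst hsr
      have h1 : ¬ (s + 1 ≤ s ∧ s - (s + 1) < xs.length) := by omega
      have h2 : s ≤ s ∧ s - s < (x :: xs).length := ⟨le_refl _, by simp⟩
      rw [if_neg h1, if_pos h2]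
      simp only [Nat.sub_self, List.getD_cons_zero, beq_self_eq_true, Bool.true_and]
      cases hQ : Q (x, s) <;> simp
    · have hb : (s == r) = false := by simpa using hsr
      simp only [hb, Bool.false_and]
      by_cases hle : s + 1 ≤ r ∧ r - (s + 1) < xs.length
      · have hc : s ≤ r ∧ r - s < (x :: xs).length := ⟨by omega, by simp only [List.length_cons]; omega⟩
        rw [if_pos hle, if_pos hc]
        have hrs : r - s = (r - (s + 1)) + 1 := by omega
        rw [hrs, List.getD_cons_succ]
        simp
      · have hc : ¬ (s ≤ r ∧ r - s < (x :: xs).length) := by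
          rintro ⟨hx1, hx2⟩
          simp only [List.length_cons] at hx2
          exact hle ⟨by omega, by omega⟩
        rw [if_neg hle, if_neg hc]
        simp

-- ---- prefix-sum side ----

def psums (s : Int) : List Int → List Int
  | [] => []
  | x :: xs => (s + x) :: psums (s + x) xs

theorem prefFold_eq :
    ∀ (rows : List (List Int)) (q0 q1 q2 : List Int),
      (∀ row ∈ rows, row.length = 3) → q0 ≠ [] → q1 ≠ [] → q2 ≠ [] →
      rows.foldl prefStep (q0, q1, q2) =
        (q0 ++ psums (PySem.List.pyGetD q0 (-1) 0) (rows.map (fun row => row.getD 0 0)),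
         q1 ++ psums (PySem.List.pyGetD q1 (-1) 0) (rows.map (fun row => row.getD 1 0)),
         q2 ++ psums (PySem.List.pyGetD q2 (-1) 0) (rows.map (fun row => row.getD 2 0))) := by
  intro rows
  induction rows with
  | nil => intro q0 q1 q2 _ _ _ _; simp [psums]
  | cons row rest ih =>
    intro q0 q1 q2 h3 h0 h1 h2
    rcases List.length_eq_three.mp (h3 row (List.mem_cons_self)) with ⟨x, y, z, rfl⟩
    rw [List.foldl_cons]
    have hstep : prefStep (q0, q1, q2) [x, y, z] =
        (q0 ++ [PySem.List.pyGetD q0 (-1) 0 + x],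
         q1 ++ [PySem.List.pyGetD q1 (-1) 0 + y],
         q2 ++ [PySem.List.pyGetD q2 (-1) 0 + z]) := rfl
    rw [hstep, ih _ _ _ (fun r hr => h3 r (List.mem_cons_of_mem _ hr)) (by simp) (by simp) (by simp)]
    simp only [PySem.List.pyGetD_neg_one_append_singleton, List.map_cons, psums, List.append_assoc,
      List.cons_append, List.nil_append, List.getD_cons_zero, List.getD_cons_succ]
theorem length_psums (s : Int) (xs : List Int) : (psums s xs).length = xs.length := by
  induction xs generalizing s with
  | nil => rfl
  | cons x xs ih => simp [psums, ih]

theorem psums_getElem?_gen :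
    ∀ (xs : List Int) (s : Int) (i : Nat),
      (psums s xs)[i]? = if i < xs.length then some (s + (xs.take (i + 1)).sum) else none := by
  intro xs
  induction xs with
  | nil => intro s i; simp [psums]
  | cons x xs ih =>
    intro s i
    cases i with
    | zero => simp [psums]
    | succ i =>
      simp only [psums, List.getElem?_cons_succ, ih (s + x) i, List.length_cons, List.take_succ_cons,
        List.sum_cons]
      by_cases h : i < xs.length
      · rw [if_pos h, if_pos (by omega)]
        congr 1
        ring
      · rw [if_neg h, if_neg (by omega)]

theorem psums_getElem? (increase : List (List Int)) (j : Nat) (i : Nat) :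
    (psums 0 (increase.map (fun row => row.getD j 0)))[i]? =
      if i < increase.length then some (colS increase j (i + 1)) else none := by
  rw [psums_getElem?_gen]
  simp only [List.length_map]
  split_ifs with h
  · congr 1
    rw [zero_add, colS, ← List.map_take]
  · rfl

theorem fdGo_eq (t : Int) :
    ∀ (l : List Int) (k : Int),
      fdGo t k l = Option.map (fun i : Nat => k + (i : Int)) (l.findIdx? (fun v => decide (t ≤ v))) := by
  intro l
  induction l with
  | nil => intro k; rfl
  | cons v rest ih =>
    intro k
    rw [List.findIdx?_cons]
    by_cases h : t ≤ v
    · simp [fdGo, h]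
    · simp only [fdGo, if_neg h, decide_eq_true_eq, ih (k + 1)]
      cases hfi : List.findIdx? (fun v => decide (t ≤ v)) rest <;> simp
      ring

theorem colS_succ (increase : List (List Int)) (j d : Nat) (row : List Int)
    (h : increase.drop d = row :: (increase.drop (d + 1))) :
    colS increase j (d + 1) = colS increase j d + row.getD j 0 := by
  have hd : d < increase.length := by
    by_contra hge
    rw [List.drop_eq_nil_of_le (by omega)] at h
    simp at h
  have h0 : increase[d]? = some row := by
    have := congrArg (fun l => l[0]?) h
    simpa [List.getElem?_drop] using this
  unfold colS
  rw [List.take_add_one, h0]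
  simp

theorem crossP_succ (increase : List (List Int)) (j : Nat) (t : Int) (d : Nat) :
    CrossP increase j t (d + 1) ↔ CrossP increase j t d ∨ t ≤ colS increase j (d + 1) := by
  constructor
  · rintro ⟨k, hk, hle⟩
    by_cases hkd : k < d
    · exact Or.inl ⟨k, hkd, hle⟩
    · have : k = d := by omega
      subst this
      exact Or.inr hle
  · rintro (⟨k, hk, hle⟩ | hle)
    · exact ⟨k, by omega, hle⟩
    · exact ⟨d, by omega, hle⟩


theorem psums_len (increase : List (List Int)) (j : Nat) :
    (psums 0 (increase.map (fun row => row.getD j 0))).length = increase.length := by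
  rw [length_psums, List.length_map]

theorem psums_elem (increase : List (List Int)) (j i : Nat) (h : i < increase.length) :
    (psums 0 (increase.map (fun row => row.getD j 0)))[i]'(by rw [psums_len]; exact h)
      = colS increase j (i + 1) := by
  have h2 := psums_getElem? increase j i
  rw [if_pos h, List.getElem?_eq_getElem (by rw [psums_len]; exact h)] at h2
  exact Option.some.inj h2

theorem firstDay_some (increase : List (List Int)) (j : Nat) (t : Int) (k : Int) :
    firstDay (0 :: psums 0 (increase.map (fun row => row.getD j 0))) t = some k ↔
      ∃ i : Nat, i < increase.length ∧ k = (i : Int) + 1 ∧ t ≤ colS increase j (i + 1) ∧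
        ∀ i' < i, ¬ t ≤ colS increase j (i' + 1) := by
  rw [firstDay, List.tail_cons, fdGo_eq]
  cases hfi : List.findIdx? (fun v => decide (t ≤ v)) (psums 0 (increase.map (fun row => row.getD j 0))) with
  | none =>
    simp only [Option.map_none]
    rw [List.findIdx?_eq_none_iff] at hfi
    constructor
    · intro h
      simp at h
    rintro ⟨i, hlen, _, hle, _⟩
    exfalso
    have hmem : colS increase j (i + 1) ∈ psums 0 (increase.map (fun row => row.getD j 0)) := by
      rw [← psums_elem increase j i hlen]
      exact List.getElem_mem _
    have := hfi _ hmem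
    simp [hle] at this
  | some i =>
    simp only [Option.map_some, Option.some.injEq]
    rcases List.findIdx?_eq_some_iff_getElem.mp hfi with ⟨hlt, hpi, hprev⟩
    have hlen : i < increase.length := by rwa [psums_len] at hlt
    constructor
    · intro hk
      refine ⟨i, hlen, by omega, ?_, ?_⟩
      · rw [← psums_elem increase j i hlen]; simpa using hpi
      · intro i' hi'
        have := hprev i' hi'
        rw [psums_elem increase j i' (by omega)] at this
        simpa using this
    · rintro ⟨i2, hlen2, hk2, hle2, hprev2⟩
      have : i2 = i := by
        by_contra hne
        rcases Nat.lt_or_ge i2 i with hlt2 | hge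
        · have := hprev i2 hlt2
          rw [psums_elem increase j i2 hlen2] at this
          simp [hle2] at this
        · have hi2 : i < i2 := by omega
          have := hprev2 i hi2
          rw [← psums_elem increase j i hlen] at this
          simp at hpi
          exact this hpi
      omega

theorem cnt3_le_three (increase requirements : List (List Int)) (r d : Nat) :
    cnt3 increase requirements r d ≤ 3 := by
  unfold cnt3; split_ifs <;> norm_num

theorem cnt3_eq_three_iff (increase requirements : List (List Int)) (r d : Nat) :
    cnt3 increase requirements r d = 3 ↔ allCrossP increase requirements r d := by
  unfold cnt3
  constructor
  · intro h j hj
    interval_cases j <;> (split_ifs at h <;> first | assumption | omega)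
  · intro h
    rw [if_pos (h 0 (by omega)), if_pos (h 1 (by omega)), if_pos (h 2 (by omega))]
    norm_num

theorem crossP_mono (increase : List (List Int)) (j : Nat) (t : Int) {d d' : Nat}
    (h : d ≤ d') : CrossP increase j t d → CrossP increase j t d' := by
  rintro ⟨k, hk, hle⟩
  exact ⟨k, lt_of_lt_of_le hk h, hle⟩

theorem allCrossP_mono (increase requirements : List (List Int)) (r : Nat) {d d' : Nat}
    (h : d ≤ d') : allCrossP increase requirements r d → allCrossP increase requirements r d' :=
  fun hall j hj => crossP_mono increase j _ h (hall j hj)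

theorem indicator_succ (c1 c0 : Prop) [Decidable c1] [Decidable c0] (hm : c0 → c1) :
    (if c1 then (1 : Int) else 0) = (if c0 then (1 : Int) else 0) + (if c1 ∧ ¬c0 then (1 : Int) else 0) := by
  by_cases h0 : c0
  · rw [if_pos (hm h0), if_pos h0, if_neg (by tauto)]
    ring
  · rw [if_neg h0]
    by_cases h1 : c1
    · rw [if_pos h1, if_pos ⟨h1, h0⟩]
      ring
    · rw [if_neg h1, if_neg (by tauto)]
      ring

theorem cnt3_succ (increase requirements : List (List Int)) (r d : Nat) :
    cnt3 increase requirements r (d + 1) = cnt3 increase requirements r d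
      + ((if CrossP increase 0 (kval requirements 0 r) (d + 1) ∧ ¬ CrossP increase 0 (kval requirements 0 r) d then (1:Int) else 0)
        + (if CrossP increase 1 (kval requirements 1 r) (d + 1) ∧ ¬ CrossP increase 1 (kval requirements 1 r) d then (1:Int) else 0)
        + (if CrossP increase 2 (kval requirements 2 r) (d + 1) ∧ ¬ CrossP increase 2 (kval requirements 2 r) d then (1:Int) else 0)) := by
  unfold cnt3
  rw [indicator_succ _ _ (crossP_mono increase 0 (kval requirements 0 r) (Nat.le_succ d)),
    indicator_succ _ _ (crossP_mono increase 1 (kval requirements 1 r) (Nat.le_succ d)),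
    indicator_succ _ _ (crossP_mono increase 2 (kval requirements 2 r) (Nat.le_succ d))]
  ring

theorem pd_mono (increase : List (List Int)) (j d : Nat) :
    ∀ a b : List Int × Nat, keyAt j a ≤ keyAt j b →
      (fun e => decide (CrossP increase j (keyAt j e) d)) b = true →
      (fun e => decide (CrossP increase j (keyAt j e) d)) a = true := by
  intro a b hab hb
  simp only [decide_eq_true_eq] at hb ⊢
  rcases hb with ⟨k, hk, hle⟩
  exact ⟨k, hk, le_trans hab hle⟩

theorem pk_mono (increase : List (List Int)) (j d : Nat) :
    ∀ a b : List Int × Nat, keyAt j a ≤ keyAt j b →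
      (fun e => decide (keyAt j e ≤ colS increase j (d + 1))) b = true →
      (fun e => decide (keyAt j e ≤ colS increase j (d + 1))) a = true := by
  intro a b hab hb
  simp only [decide_eq_true_eq] at hb ⊢
  exact le_trans hab hb

theorem remj_step (increase requirements : List (List Int)) (j d : Nat) :
    (remj increase requirements j d).dropWhile
        (fun e => decide (keyAt j e ≤ colS increase j (d + 1)))
      = remj increase requirements j (d + 1) := by
  unfold remj
  rw [← dropWhile_dropWhile (fun e => decide (CrossP increase j (keyAt j e) d))
        (fun e => decide (CrossP increase j (keyAt j e) (d + 1)))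
        (fun e he => by
          simp only [decide_eq_true_eq] at he ⊢
          exact crossP_mono increase j _ (Nat.le_succ d) he)
        (sortedE requirements j)]
  apply dropWhile_congr_mem
  intro e he
  have hf := dropWhile_all_false (keyAt j) _ (pd_mono increase j d) (sortedE requirements j)
    (PySem.List.sorted_pairwise requirements.zipIdx (keyAt j)) e he
  simp only [decide_eq_false_iff_not] at hf
  simp only [decide_eq_decide]
  rw [crossP_succ]
  constructor
  · intro hle
    exact Or.inr hle
  · rintro (hd | hle)
    · exact absurd hd hf
    · exact hle

theorem Tj_count (increase requirements : List (List Int)) (j d r : Nat)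
    (hr : r < requirements.length) :
    ((remj increase requirements j d).takeWhile
        (fun e => decide (keyAt j e ≤ colS increase j (d + 1)))).countP (fun e => e.2 == r)
      = if CrossP increase j (kval requirements j r) (d + 1) ∧
            ¬ CrossP increase j (kval requirements j r) d then 1 else 0 := by
  have hpair := PySem.List.sorted_pairwise requirements.zipIdx (keyAt j)
  have hrem_pair : (remj increase requirements j d).Pairwise (fun a b => keyAt j a ≤ keyAt j b) := by
    unfold remj
    exact List.Pairwise.sublist (List.dropWhile_sublist _) hpair
  rw [takeWhile_eq_filter (keyAt j) _ (pk_mono increase j d) _ hrem_pair]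
  unfold remj sortedE
  rw [dropWhile_eq_filter_not (keyAt j) _ (pd_mono increase j d) _ hpair,
    List.filter_filter, List.countP_filter,
    (PySem.List.sorted_perm requirements.zipIdx (keyAt j) false).countP_eq]
  rw [countP_zipIdx r
    (fun e => decide (keyAt j e ≤ colS increase j (d + 1)) && ! decide (CrossP increase j (keyAt j e) d))
    requirements 0]
  rw [if_pos ⟨Nat.zero_le r, by simpa using hr⟩]
  have hkey : keyAt j (requirements.getD (r - 0) default, r) = kval requirements j r := rfl
  have hiff : (decide (keyAt j (requirements.getD (r - 0) default, r) ≤ colS increase j (d + 1)) &&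
        ! decide (CrossP increase j (keyAt j (requirements.getD (r - 0) default, r)) d)) = true ↔
      (CrossP increase j (kval requirements j r) (d + 1) ∧
        ¬ CrossP increase j (kval requirements j r) d) := by
    rw [hkey]
    simp only [Bool.and_eq_true, decide_eq_true_eq, Bool.not_eq_eq_eq_not, Bool.not_true,
      decide_eq_false_iff_not]
    rw [crossP_succ]
    constructor
    · rintro ⟨hle, hnd⟩
      exact ⟨Or.inr hle, hnd⟩
    · rintro ⟨hd | hle, hnd⟩
      · exact absurd hd hnd
      · exact ⟨hle, hnd⟩
  by_cases hc : CrossP increase j (kval requirements j r) (d + 1) ∧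
      ¬ CrossP increase j (kval requirements j r) d
  · rw [if_pos (hiff.mpr hc), if_pos hc]
  · rw [if_neg (fun ht => hc (hiff.mp ht)), if_neg hc]

theorem step_inv (increase requirements : List (List Int))
    (hpre : ∀ row ∈ increase, row.length = 3) (d : Nat) (row : List Int)
    (hdrop : increase.drop d = row :: (increase.drop (d + 1)))
    (hrow : row ∈ increase) (st : PVAState)
    (hInv : AInv increase requirements d st) :
    AInv increase requirements (d + 1) (aStep st (row, d)) := by
  obtain ⟨ha0, ha1, ha2, hs0, hs1, hs2, htrig, hans⟩ := hInv
  obtain ⟨na, nb, nc, rfl⟩ := List.length_eq_three.mp (hpre row hrow)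
  have hS0 : colS increase 0 (d + 1) = colS increase 0 d + na := by
    simpa using colS_succ increase 0 d [na, nb, nc] hdrop
  have hS1 : colS increase 1 (d + 1) = colS increase 1 d + nb := by
    simpa using colS_succ increase 1 d [na, nb, nc] hdrop
  have hS2 : colS increase 2 (d + 1) = colS increase 2 d + nc := by
    simpa using colS_succ increase 2 d [na, nb, nc] hdrop
  have hstep : aStep st ([na, nb, nc], d) =
      ⟨colS increase 0 (d + 1), colS increase 1 (d + 1), colS increase 2 (d + 1),
       remj increase requirements 0 (d + 1), remj increase requirements 1 (d + 1),
       remj increase requirements 2 (d + 1),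
       ((((remj increase requirements 0 d).takeWhile (fun e => decide (keyAt 0 e ≤ colS increase 0 (d + 1)))
          ++ (remj increase requirements 1 d).takeWhile (fun e => decide (keyAt 1 e ≤ colS increase 1 (d + 1))))
          ++ (remj increase requirements 2 d).takeWhile (fun e => decide (keyAt 2 e ≤ colS increase 2 (d + 1)))).foldl
            (updTA d) (trigSpec increase requirements d, ansSpec increase requirements d)).1,
       ((((remj increase requirements 0 d).takeWhile (fun e => decide (keyAt 0 e ≤ colS increase 0 (d + 1)))
          ++ (remj increase requirements 1 d).takeWhile (fun e => decide (keyAt 1 e ≤ colS increase 1 (d + 1))))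
          ++ (remj increase requirements 2 d).takeWhile (fun e => decide (keyAt 2 e ≤ colS increase 2 (d + 1)))).foldl
            (updTA d) (trigSpec increase requirements d, ansSpec increase requirements d)).2⟩ := by
    simp only [aStep, runCoord_eq]
    rw [hs0, hs1, hs2, htrig, hans, ha0, ha1, ha2, ← hS0, ← hS1, ← hS2,
      remj_step, remj_step, remj_step, List.foldl_append, List.foldl_append]
  rw [hstep]
  set P := (((remj increase requirements 0 d).takeWhile (fun e => decide (keyAt 0 e ≤ colS increase 0 (d + 1)))
      ++ (remj increase requirements 1 d).takeWhile (fun e => decide (keyAt 1 e ≤ colS increase 1 (d + 1))))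
      ++ (remj increase requirements 2 d).takeWhile (fun e => decide (keyAt 2 e ≤ colS increase 2 (d + 1)))) with hP
  have hcastind : ∀ (c : Prop) (inst : Decidable c), ((@ite Nat c inst 1 0 : Nat) : Int) = @ite Int c inst 1 0 := by
    intro c inst
    split_ifs <;> rfl
  have hcnt : ∀ i, i < requirements.length →
      cnt3 increase requirements i d + ((P.countP (fun e => e.2 == i) : Nat) : Int)
        = cnt3 increase requirements i (d + 1) := by
    intro i him
    rw [hP, List.countP_append, List.countP_append,
      Tj_count increase requirements 0 d i him, Tj_count increase requirements 1 d i him,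
      Tj_count increase requirements 2 d i him, cnt3_succ]
    rw [Nat.cast_add, Nat.cast_add, hcastind, hcastind, hcastind]
  have hlent : (trigSpec increase requirements d).length = requirements.length := by
    simp [trigSpec]
  have hlena : (ansSpec increase requirements d).length = requirements.length := by
    simp [ansSpec]
  have hFUlen := foldUpd_len d P (trigSpec increase requirements d, ansSpec increase requirements d)
  refine ⟨rfl, rfl, rfl, rfl, rfl, rfl, ?_, ?_⟩
  · -- trigger component
    apply List.ext_getElem
    · rw [hFUlen.1, hlent]
      simp [trigSpec]
    · intro i h1 h2
      have him : i < requirements.length := by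
        rw [hFUlen.1, hlent] at h1
        exact h1
      rw [← List.getD_eq_getElem _ 0 h1, ← List.getD_eq_getElem _ 0 h2]
      rw [(foldUpd_getD d P (trigSpec increase requirements d) (ansSpec increase requirements d) i
        (by rw [hlent]; exact him) (by rw [hlena]; exact him)).1]
      unfold trigSpec
      rw [PySem.List.getD_map_range _ _ _ _ him, PySem.List.getD_map_range _ _ _ _ him]
      exact hcnt i him
  · -- ans component
    apply List.ext_getElem
    · rw [hFUlen.2, hlena]
      simp [ansSpec]
    · intro i h1 h2
      have him : i < requirements.length := by
        rw [hFUlen.2, hlena] at h1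
        exact h1
      rw [← List.getD_eq_getElem _ 0 h1, ← List.getD_eq_getElem _ 0 h2]
      rw [(foldUpd_getD d P (trigSpec increase requirements d) (ansSpec increase requirements d) i
        (by rw [hlent]; exact him) (by rw [hlena]; exact him)).2]
      unfold trigSpec ansSpec
      rw [PySem.List.getD_map_range _ _ _ _ him, PySem.List.getD_map_range _ _ _ _ him,
        PySem.List.getD_map_range _ _ _ _ him]
      have hsum := hcnt i him
      unfold trigSpec at hsum
      by_cases hAll1 : allCrossP increase requirements i (d + 1)
      · by_cases hAll0 : allCrossP increase requirements i d
        · rw [if_neg (by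
            rintro ⟨hlt, _⟩
            rw [(cnt3_eq_three_iff increase requirements i d).mpr hAll0] at hlt
            omega)]
          unfold ansSpecAt
          rw [dif_pos hAll0, dif_pos hAll1]
        · have h31 : cnt3 increase requirements i (d + 1) = 3 :=
            (cnt3_eq_three_iff increase requirements i (d + 1)).mpr hAll1
          have h30 : cnt3 increase requirements i d ≠ 3 := fun h =>
            hAll0 ((cnt3_eq_three_iff increase requirements i d).mp h)
          have hle3 := cnt3_le_three increase requirements i d
          rw [if_pos ⟨by omega, by rw [hsum, h31]⟩]
          unfold ansSpecAt
          rw [dif_pos hAll1]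
          have hfind : Nat.find (⟨d + 1, hAll1⟩ : ∃ d', allCrossP increase requirements i d') = d + 1 := by
            rw [Nat.find_eq_iff]
            exact ⟨hAll1, fun k hk hak => hAll0 (allCrossP_mono increase requirements i (by omega) hak)⟩
          rw [hfind]
          push_cast
          ring
      · have hAll0 : ¬ allCrossP increase requirements i d := fun h =>
          hAll1 (allCrossP_mono increase requirements i (Nat.le_succ d) h)
        rw [if_neg (by
          rintro ⟨_, hge⟩
          rw [hsum] at hge
          have hle3 := cnt3_le_three increase requirements i (d + 1)
          have hne : cnt3 increase requirements i (d + 1) ≠ 3 := fun h =>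
            hAll1 ((cnt3_eq_three_iff increase requirements i (d + 1)).mp h)
          omega)]
        unfold ansSpecAt
        rw [dif_neg hAll0, dif_neg hAll1]

theorem fold_inv (increase requirements : List (List Int))
    (hpre : ∀ row ∈ increase, row.length = 3) :
    ∀ (rows : List (List Int)) (d : Nat) (st : PVAState),
      increase.drop d = rows → AInv increase requirements d st →
      AInv increase requirements (d + rows.length) ((rows.zipIdx d).foldl aStep st) := by
  intro rows
  induction rows with
  | nil =>
    intro d st _ hInv
    simpa using hInv
  | cons row rest ih =>
    intro d st hdrop hInv
    have hdrop1 : increase.drop (d + 1) = rest := by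
      have : increase.drop (d + 1) = (increase.drop d).drop 1 := by
        rw [List.drop_drop]
      rw [this, hdrop]
      rfl
    have hrow : row ∈ increase := by
      have : row ∈ increase.drop d := by
        rw [hdrop]
        exact List.mem_cons_self
      exact List.mem_of_mem_drop this
    have hstep := step_inv increase requirements hpre d row (by rw [hdrop, hdrop1]) hrow st hInv
    have := ih (d + 1) (aStep st (row, d)) hdrop1 hstep
    rw [List.zipIdx_cons, List.foldl_cons]
    rw [show d + (row :: rest).length = (d + 1) + rest.length by simp; omega]
    exact this

theorem dropWhile_of_all_neg {α : Type} (p : α → Bool) :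
    ∀ (l : List α), (∀ e ∈ l, p e = false) → l.dropWhile p = l := by
  intro l
  induction l with
  | nil => intro _; rfl
  | cons a l _ =>
    intro h
    rw [List.dropWhile_cons_of_neg (by simp [h a (List.mem_cons_self)])]

theorem crossP_zero (increase : List (List Int)) (j : Nat) (t : Int) :
    ¬ CrossP increase j t 0 := by
  rintro ⟨k, hk, _⟩
  omega

theorem init_inv (increase requirements : List (List Int)) :
    AInv increase requirements 0
      ⟨0, 0, 0, sortedE requirements 0, sortedE requirements 1, sortedE requirements 2,
        List.replicate requirements.zipIdx.length 0,
        List.replicate requirements.zipIdx.length (-1)⟩ := by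
  have hrem : ∀ j, remj increase requirements j 0 = sortedE requirements j := by
    intro j
    unfold remj
    exact dropWhile_of_all_neg _ _ (fun e _ => by simp [crossP_zero])
  refine ⟨by simp [colS], by simp [colS], by simp [colS], (hrem 0).symm, (hrem 1).symm, (hrem 2).symm, ?_, ?_⟩
  · show List.replicate requirements.zipIdx.length 0 = trigSpec increase requirements 0
    unfold trigSpec cnt3
    rw [List.map_congr_left (fun r _ => by
      rw [if_neg (crossP_zero increase 0 _), if_neg (crossP_zero increase 1 _),
        if_neg (crossP_zero increase 2 _)]), List.map_const']
    simp [List.length_zipIdx]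
  · show List.replicate requirements.zipIdx.length (-1) = ansSpec increase requirements 0
    unfold ansSpec ansSpecAt
    rw [List.map_congr_left (fun r _ => by
      rw [dif_neg (fun hall => crossP_zero increase 0 _ (hall 0 (by omega)))]), List.map_const']
    simp [List.length_zipIdx]

theorem override_fold :
    ∀ (l : List (List Int)) (s : Nat) (ans : List Int),
      (((l.zipIdx s).foldl (fun ans e =>
          match e.1 with
          | [na, nb, nc] => if na = 0 ∧ nb = 0 ∧ nc = 0 then ans.set e.2 0 else ans
          | _ => ans) ans).length = ans.length) ∧
      (∀ r, ((l.zipIdx s).foldl (fun ans e =>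
          match e.1 with
          | [na, nb, nc] => if na = 0 ∧ nb = 0 ∧ nc = 0 then ans.set e.2 0 else ans
          | _ => ans) ans).getD r 0
        = if s ≤ r ∧ r - s < l.length ∧ l.getD (r - s) [] = [0, 0, 0] ∧ r < ans.length
          then 0 else ans.getD r 0) := by
  intro l
  induction l with
  | nil =>
    intro s ans
    refine ⟨rfl, fun r => ?_⟩
    rw [if_neg (by rintro ⟨_, h2, _⟩; simp at h2)]
    rfl
  | cons x xs ih =>
    intro s ans
    rw [List.zipIdx_cons, List.foldl_cons]
    have hstep : (match (x, s).1 with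
        | [na, nb, nc] => if na = 0 ∧ nb = 0 ∧ nc = 0 then ans.set (x, s).2 0 else ans
        | _ => ans) = if x = [0, 0, 0] then ans.set s 0 else ans := by
      rcases x with _ | ⟨na, _ | ⟨nb, _ | ⟨nc, _ | ⟨nd, tl⟩⟩⟩⟩ <;> simp_all
    rw [hstep]
    set ans' := if x = [0, 0, 0] then ans.set s 0 else ans with hans'
    have hlen' : ans'.length = ans.length := by
      rw [hans']; split <;> simp
    rcases ih (s + 1) ans' with ⟨ihl, ihg⟩
    refine ⟨by rw [ihl, hlen'], fun r => ?_⟩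
    rw [ihg r, hlen']
    by_cases hrs : r = s
    · subst hrs
      rw [if_neg (by omega)]
      by_cases hr : r < ans.length
      · by_cases hx : x = [0, 0, 0]
        · rw [if_pos ⟨le_refl r, by simp, by simp [hx], hr⟩]
          rw [hans', if_pos hx, List.getD_eq_getElem?_getD, List.getElem?_set, if_pos rfl, if_pos hr]
          rfl
        · rw [if_neg (by rintro ⟨_, _, h3, _⟩; simp at h3; exact hx h3), hans', if_neg hx]
      · rw [if_neg (by rintro ⟨_, _, _, h4⟩; omega)]
        rw [hans']
        split
        · rw [List.getD_eq_getElem?_getD, List.getElem?_set, if_pos rfl, if_neg hr,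
            List.getD_eq_getElem?_getD (l := ans), List.getElem?_eq_none (by omega)]
        · rfl
    · have hg' : ans'.getD r 0 = ans.getD r 0 := by
        rw [hans']
        split
        · rw [List.getD_eq_getElem?_getD, List.getElem?_set, if_neg (by omega)]
          rfl
        · rfl
      rw [hg']
      by_cases hc : s + 1 ≤ r ∧ r - (s + 1) < xs.length ∧ xs.getD (r - (s + 1)) [] = [0, 0, 0] ∧ r < ans.length
      · rw [if_pos hc, if_pos ⟨by omega, by simp only [List.length_cons]; omega, by
          have : r - s = (r - (s + 1)) + 1 := by omega
          rw [this, List.getD_cons_succ]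
          exact hc.2.2.1, hc.2.2.2⟩]
      · rw [if_neg hc, if_neg (by
          rintro ⟨h1, h2, h3, h4⟩
          simp only [List.length_cons] at h2
          have hgt : s + 1 ≤ r := by omega
          have : r - s = (r - (s + 1)) + 1 := by omega
          rw [this, List.getD_cons_succ] at h3
          exact hc ⟨hgt, by omega, h3, h4⟩)]

theorem main_equal (increase requirements : List (List Int))
    (hpre : Pre_getTriggerTime increase requirements) :
    getTriggerTime increase requirements = getTriggerTime_alt increase requirements := by
  obtain ⟨hpreI, hpreR⟩ := hpre
  -- characterise A's fold
  have hFold := fold_inv increase requirements hpreI increase 0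
    ⟨0, 0, 0, sortedE requirements 0, sortedE requirements 1, sortedE requirements 2,
      List.replicate requirements.zipIdx.length 0,
      List.replicate requirements.zipIdx.length (-1)⟩ rfl (init_inv increase requirements)
  rw [Nat.zero_add] at hFold
  have hansA := hFold.2.2.2.2.2.2.2
  -- characterise B's prefix lists
  have h00 : PySem.List.pyGetD ([0] : List Int) (-1) 0 = 0 := rfl
  have hpref : increase.foldl prefStep ([0], [0], [0])
      = (0 :: psums 0 (increase.map (fun row => row.getD 0 0)),
         0 :: psums 0 (increase.map (fun row => row.getD 1 0)),
         0 :: psums 0 (increase.map (fun row => row.getD 2 0))) := by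
    rw [prefFold_eq increase [0] [0] [0] hpreI (by simp) (by simp) (by simp), h00]
    rfl
  simp only [getTriggerTime, getTriggerTime_alt, hpref]
  unfold sortedE at hansA
  rw [hansA]
  have hov := override_fold requirements 0 (ansSpec increase requirements increase.length)
  have hlena : (ansSpec increase requirements increase.length).length = requirements.length := by
    simp [ansSpec]
  apply List.ext_getElem
  · rw [hov.1, hlena, List.length_map]
  · intro r h1 h2
    have hrm : r < requirements.length := by rwa [hov.1, hlena] at h1
    have hreq3 := hpreR requirements[r] (List.getElem_mem hrm)
    obtain ⟨a, b, c, hreq⟩ := List.length_eq_three.mp hreq3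
    have hgetDr : requirements.getD r [] = [a, b, c] := by
      rw [List.getD_eq_getElem _ _ hrm, hreq]
    have hka : kval requirements 0 r = a := by rw [kval, hgetDr]; rfl
    have hkb : kval requirements 1 r = b := by rw [kval, hgetDr]; rfl
    have hkc : kval requirements 2 r = c := by rw [kval, hgetDr]; rfl
    rw [← List.getD_eq_getElem _ 0 h1, hov.2 r]
    simp only [Nat.sub_zero]
    rw [List.getElem_map, hreq]
    by_cases hz : a = 0 ∧ b = 0 ∧ c = 0
    · rw [if_pos ⟨Nat.zero_le r, by simpa using hrm, by rw [hgetDr, hz.1, hz.2.1, hz.2.2],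
        by rwa [hlena]⟩]
      simp only [solveReq, if_pos hz]
    · rw [if_neg (by
        rintro ⟨_, _, h3, _⟩
        rw [hgetDr] at h3
        simp only [List.cons.injEq, and_true] at h3
        exact hz h3)]
      rw [show (ansSpec increase requirements increase.length).getD r 0
          = ansSpecAt increase requirements r increase.length from by
        unfold ansSpec
        rw [PySem.List.getD_map_range _ _ _ _ hrm]]
      simp only [solveReq, if_neg hz]
      by_cases hAll : allCrossP increase requirements r increase.length
      · -- all three thresholds reached: both sides give the trigger day
        have hc0 : CrossP increase 0 a increase.length := by rw [← hka]; exact hAll 0 (by omega)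
        have hc1 : CrossP increase 1 b increase.length := by rw [← hkb]; exact hAll 1 (by omega)
        have hc2 : CrossP increase 2 c increase.length := by rw [← hkc]; exact hAll 2 (by omega)
        obtain ⟨k0, hk0, hle0⟩ := hc0
        obtain ⟨k1, hk1, hle1⟩ := hc1
        obtain ⟨k2, hk2, hle2⟩ := hc2
        have hex0 : ∃ i, a ≤ colS increase 0 (i + 1) := ⟨k0, hle0⟩
        have hex1 : ∃ i, b ≤ colS increase 1 (i + 1) := ⟨k1, hle1⟩
        have hex2 : ∃ i, c ≤ colS increase 2 (i + 1) := ⟨k2, hle2⟩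
        have hi0n : Nat.find hex0 < increase.length :=
          lt_of_le_of_lt (Nat.find_min' hex0 hle0) hk0
        have hi1n : Nat.find hex1 < increase.length :=
          lt_of_le_of_lt (Nat.find_min' hex1 hle1) hk1
        have hi2n : Nat.find hex2 < increase.length :=
          lt_of_le_of_lt (Nat.find_min' hex2 hle2) hk2
        rw [(firstDay_some increase 0 a _).mpr
            ⟨Nat.find hex0, hi0n, rfl, Nat.find_spec hex0, fun i' hi' => Nat.find_min hex0 hi'⟩,
          (firstDay_some increase 1 b _).mpr
            ⟨Nat.find hex1, hi1n, rfl, Nat.find_spec hex1, fun i' hi' => Nat.find_min hex1 hi'⟩,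
          (firstDay_some increase 2 c _).mpr
            ⟨Nat.find hex2, hi2n, rfl, Nat.find_spec hex2, fun i' hi' => Nat.find_min hex2 hi'⟩]
        unfold ansSpecAt
        rw [dif_pos hAll]
        set M := max (Nat.find hex0 + 1) (max (Nat.find hex1 + 1) (Nat.find hex2 + 1)) with hM
        have hallM : allCrossP increase requirements r M := by
          intro j hj
          interval_cases j
          · exact ⟨Nat.find hex0, by omega, by rw [hka]; exact Nat.find_spec hex0⟩
          · exact ⟨Nat.find hex1, by omega, by rw [hkb]; exact Nat.find_spec hex1⟩
          · exact ⟨Nat.find hex2, by omega, by rw [hkc]; exact Nat.find_spec hex2⟩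
        have hDleM : Nat.find (⟨increase.length, hAll⟩ : ∃ d', allCrossP increase requirements r d') ≤ M :=
          Nat.find_min' _ hallM
        have hMleD : M ≤ Nat.find (⟨increase.length, hAll⟩ : ∃ d', allCrossP increase requirements r d') := by
          have hDall := Nat.find_spec (⟨increase.length, hAll⟩ : ∃ d', allCrossP increase requirements r d')
          obtain ⟨j0, hj0, hle0'⟩ := hDall 0 (by omega)
          obtain ⟨j1, hj1, hle1'⟩ := hDall 1 (by omega)
          obtain ⟨j2, hj2, hle2'⟩ := hDall 2 (by omega)
          have := Nat.find_min' hex0 (by rw [← hka]; exact hle0')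
          have := Nat.find_min' hex1 (by rw [← hkb]; exact hle1')
          have := Nat.find_min' hex2 (by rw [← hkc]; exact hle2')
          omega
        have hDM : Nat.find (⟨increase.length, hAll⟩ : ∃ d', allCrossP increase requirements r d') = M :=
          le_antisymm hDleM hMleD
        rw [hDM, hM]
        push_cast [Nat.cast_max]
        rfl
      · -- some threshold never reached: both sides give -1
        unfold ansSpecAt
        rw [dif_neg hAll]
        cases hf0 : firstDay (0 :: psums 0 (increase.map (fun row => row.getD 0 0))) a with
        | none => rfl
        | some v0 =>
          cases hf1 : firstDay (0 :: psums 0 (increase.map (fun row => row.getD 1 0))) b with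
          | none => rfl
          | some v1 =>
            cases hf2 : firstDay (0 :: psums 0 (increase.map (fun row => row.getD 2 0))) c with
            | none => rfl
            | some v2 =>
              exfalso
              obtain ⟨i0, hi0, _, hle0, _⟩ := (firstDay_some increase 0 a v0).mp hf0
              obtain ⟨i1, hi1, _, hle1, _⟩ := (firstDay_some increase 1 b v1).mp hf1
              obtain ⟨i2, hi2, _, hle2, _⟩ := (firstDay_some increase 2 c v2).mp hf2
              apply hAll
              intro j hj
              interval_cases j
              · exact ⟨i0, hi0, by rw [hka]; exact hle0⟩
              · exact ⟨i1, hi1, by rw [hkb]; exact hle1⟩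
              · exact ⟨i2, hi2, by rw [hkc]; exact hle2⟩

-- ===== VERDICT (by name: the statement is the Claim_ definition above) =====
theorem getTriggerTime_spec : Claim_equal_getTriggerTime := by
  intro increase requirements _ hpre
  unfold Spec_getTriggerTime
  exact main_equal increase requirements hpre
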